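-- pv_equiv track=rewrite | github.com/kartoniks/Studia | AI/l1/z4.py | opt_dist2
-- ===== SOURCE A (Python) =====
-- def opt_dist2(bits, n):
--   def count1(id):#check for n consecutive 1s starting at id
--     ones=0
--     for i in range(id, id+n):
--       if bits[i]==1:
--         ones += 1
--     return ones
--   bestid=0
--   bestcount=0
--   for i in range(0, len(bits)-n+1):
--     newcount = count1(i)
--     if bestcount < newcount:
--       bestid=i
--       bestcount=newcount
--   tochange=0
--   for i in range(0, len(bits)):
--     if bestid<=i<bestid+n and bits[i]==0:
--       tochange += 1
--     if (bestid>i or bestid+n<=i) and bits[i]==1: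
--       tochange += 1
--   return tochange
-- ===== SOURCE B (Python) =====
-- def opt_dist2(bits, n):
--     # Sliding-window running sum: O(len) instead of O(len*n).
--     L = len(bits)
--     best = 0
--     if 0 < n <= L:
--         w = sum(1 for b in bits[:n] if b == 1)
--         bc = w
--         for i in range(1, L - n + 1):
--             w += (bits[i + n - 1] == 1) - (bits[i - 1] == 1)
--             if w > bc:
--                 best, bc = i, w
--     m = max(n, 0)
--     win = bits[best:best + m]
--     ones_total = sum(1 for b in bits if b == 1)
--     ones_in = sum(1 for b in win if b == 1)
--     zeros_in = sum(1 for b in win if b == 0)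
--     return zeros_in + ones_total - ones_in
-- ===== Notes on version B (the rewrite author's own statement) =====
-- stated objective: faster
-- what changed: B replaces A's per-window re-count (count1 called for every start index) by a single sliding-window running sum to pick the best window, and computes the flip count from slice counts of the chosen window instead of a second index-by-index scan.
import Mathlib
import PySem

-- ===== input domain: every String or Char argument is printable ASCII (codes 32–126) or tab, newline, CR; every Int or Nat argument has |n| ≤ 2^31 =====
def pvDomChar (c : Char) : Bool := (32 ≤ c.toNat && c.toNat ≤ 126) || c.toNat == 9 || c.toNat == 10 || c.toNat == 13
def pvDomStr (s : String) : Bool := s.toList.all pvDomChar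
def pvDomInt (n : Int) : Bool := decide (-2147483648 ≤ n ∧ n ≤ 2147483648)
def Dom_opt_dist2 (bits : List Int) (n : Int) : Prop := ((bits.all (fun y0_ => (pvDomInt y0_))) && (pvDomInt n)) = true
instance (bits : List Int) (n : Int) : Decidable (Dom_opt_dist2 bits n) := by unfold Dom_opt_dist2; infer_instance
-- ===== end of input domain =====

-- B replaces A's O(len·n) re-count of every window by an O(len) sliding-window running sum
-- and computes the flip count from the chosen window's slice; return values are identical.

-- ===== PORT A =====
-- helper count1 of A; bits[i] is always in range on the indices A's loops reach, so pyGetD's default is never used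
def pvCount1A (bits : List Int) (n : Int) (id : Int) : Int :=
  (PySem.List.pyRange id (id + n) 1).foldl
    (fun ones i => if PySem.List.pyGetD bits i 0 == 1 then ones + 1 else ones) 0

def opt_dist2 (bits : List Int) (n : Int) : Int :=
  let best :=
    (PySem.List.pyRange 0 ((bits.length : Int) - n + 1) 1).foldl
      (fun (st : Int × Int) i =>
        let newcount := pvCount1A bits n i
        if st.2 < newcount then (i, newcount) else st)
      (0, 0)
  (PySem.List.pyRange 0 (bits.length : Int) 1).foldl
    (fun tochange i =>
      let t1 := if (best.1 ≤ i ∧ i < best.1 + n) ∧ PySem.List.pyGetD bits i 0 == 0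
                then tochange + 1 else tochange
      if (best.1 > i ∨ best.1 + n ≤ i) ∧ PySem.List.pyGetD bits i 0 == 1
      then t1 + 1 else t1)
    0

-- ===== PORT B =====
-- sliding-window running sum (Source B): one pass over the list instead of a re-count per window
def opt_dist2_alt (bits : List Int) (n : Int) : Int :=
  let L : Int := bits.length
  let best : Int :=
    if 0 < n ∧ n ≤ L then
      let w0 : Int := ((PySem.List.slice bits none (some n)).countP (fun b => b == 1) : Nat)
      ((PySem.List.pyRange 1 (L - n + 1) 1).foldl
        (fun (st : Int × Int × Int) i =>
          let w := st.2.2 + (if PySem.List.pyGetD bits (i + n - 1) 0 == 1 then (1:Int) else 0)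
                          - (if PySem.List.pyGetD bits (i - 1) 0 == 1 then (1:Int) else 0)
          if st.2.1 < w then (i, w, w) else (st.1, st.2.1, w))
        (0, w0, w0)).1
    else 0
  let m : Int := max n 0
  let win := PySem.List.slice bits (some best) (some (best + m))
  let onesTotal : Int := (bits.countP (fun b => b == 1) : Nat)
  let onesIn : Int := (win.countP (fun b => b == 1) : Nat)
  let zerosIn : Int := (win.countP (fun b => b == 0) : Nat)
  zerosIn + onesTotal - onesIn

-- ===== PRECONDITION & SPEC =====
def Spec_opt_dist2 (bits : List Int) (n : Int) (out : Int) : Prop := out = opt_dist2_alt bits n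
instance (bits : List Int) (n : Int) (out : Int) : Decidable (Spec_opt_dist2 bits n out) := by unfold Spec_opt_dist2; infer_instance

-- ===== CLAIM (what is proved, stated in full; the proofs are below) =====
def Claim_equal_opt_dist2 : Prop := ∀ (bits : List Int) (n : Int), Dom_opt_dist2 bits n → Spec_opt_dist2 bits n (opt_dist2 bits n)

-- ===== LEMMAS AND PROOFS =====

-- count of elements equal to v among the first j elements of bits
def pvCnt (bits : List Int) (v : Int) (j : Nat) : Int := ((bits.take j).countP (fun x => x == v) : Nat)

-- number of ones in the window of length n starting at index i
def pvG (bits : List Int) (n : Int) (i : Int) : Int :=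
  pvCnt bits 1 (i.toNat + n.toNat) - pvCnt bits 1 i.toNat

theorem pvCnt_succ (bits : List Int) (v : Int) (j : Nat) (h : j < bits.length) :
    pvCnt bits v (j + 1) = pvCnt bits v j + (if bits.getD j 0 == v then 1 else 0) := by
  unfold pvCnt
  rw [List.take_add_one, List.countP_append, List.getElem?_eq_getElem h]
  simp [List.getD_eq_getElem?_getD, List.getElem?_eq_getElem h, List.countP_cons]

theorem pvCnt_add (bits : List Int) (v : Int) (a k : Nat) :
    pvCnt bits v (a + k) = pvCnt bits v a + (((bits.drop a).take k).countP (fun x => x == v) : Nat) := by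
  unfold pvCnt
  rw [List.take_add, List.countP_append]
  push_cast; ring

theorem pvCnt_len (bits : List Int) (v : Int) (j : Nat) (h : bits.length <= j) :
    pvCnt bits v j = ((bits.countP (fun x => x == v) : Nat) : Int) := by
  unfold pvCnt
  rw [List.take_of_length_le h]

theorem pv_fold_cnt (bits : List Int) (v : Int) (a k : Nat) (hb : a + k ≤ bits.length) (s : Int) :
    (PySem.List.pyRange (a : Int) ((a : Int) + (k : Int)) 1).foldl
      (fun acc i => if PySem.List.pyGetD bits i 0 == v then acc + 1 else acc) s
    = s + (pvCnt bits v (a + k) - pvCnt bits v a) := by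
  induction k with
  | zero => rw [PySem.List.pyRange_one_eq_nil (by omega)]; simp
  | succ k ih =>
    rw [show ((a : Int) + ((k+1 : Nat) : Int)) = ((a : Int) + (k : Int)) + 1 by push_cast; ring,
      PySem.List.pyRange_one_succ_right (by omega), List.foldl_append, ih (by omega)]
    have hcast : (a : Int) + (k : Int) = ((a + k : Nat) : Int) := by push_cast; ring
    simp only [List.foldl_cons, List.foldl_nil, hcast, PySem.List.pyGetD_natCast]
    rw [show a + (k+1) = (a+k) + 1 by ring, pvCnt_succ bits v (a+k) (by omega)]
    split_ifs <;> ring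

theorem pvCount1A_nonpos (bits : List Int) (n : Int) (hn : n ≤ 0) (i : Int) :
    pvCount1A bits n i = 0 := by
  unfold pvCount1A
  rw [PySem.List.pyRange_one_eq_nil (by omega)]
  rfl

theorem pvCount1A_eq (bits : List Int) (n : Int) (hn : 0 < n) (i : Int) (h0 : 0 ≤ i)
    (h2 : i + n ≤ (bits.length : Int)) :
    pvCount1A bits n i = pvG bits n i := by
  unfold pvCount1A pvG
  have hi : ((i.toNat : Nat) : Int) = i := Int.toNat_of_nonneg h0
  have hnn : ((n.toNat : Nat) : Int) = n := Int.toNat_of_nonneg (le_of_lt hn)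
  have := pv_fold_cnt bits 1 i.toNat n.toNat (by omega) 0
  rw [hi, hnn] at this
  rw [this]; ring

theorem pvG_nonneg (bits : List Int) (n : Int) (i : Int) : 0 <= pvG bits n i := by
  unfold pvG
  rw [pvCnt_add]
  simp

theorem pvG_delta (bits : List Int) (n : Int) (hn : 0 < n) (i : Int) (h1 : 1 ≤ i)
    (h2 : i + n ≤ (bits.length : Int)) :
    pvG bits n i = pvG bits n (i - 1)
      + (if PySem.List.pyGetD bits (i + n - 1) 0 == 1 then (1:Int) else 0)
      - (if PySem.List.pyGetD bits (i - 1) 0 == 1 then (1:Int) else 0) := by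
  obtain ⟨j, rfl⟩ : ∃ j : Nat, i = (j:Int)+1 := ⟨(i-1).toNat, by omega⟩
  obtain ⟨nn, rfl⟩ : ∃ nn : Nat, n = (nn:Int) := ⟨n.toNat, by omega⟩
  unfold pvG
  have e1 : (j:Int) + 1 + nn - 1 = ((j + nn : Nat) : Int) := by push_cast; ring
  have e2 : (j:Int) + 1 - 1 = ((j : Nat) : Int) := by ring
  rw [e1, e2, PySem.List.pyGetD_natCast, PySem.List.pyGetD_natCast]
  simp only [show ((j:Int)+1).toNat = j+1 from by omega, Int.toNat_natCast]
  rw [show j + 1 + nn = (j + nn) + 1 from by omega,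
    pvCnt_succ bits 1 (j+nn) (by omega), pvCnt_succ bits 1 j (by omega)]
  split_ifs <;> ring

theorem pv_sim (h : Int → Int) (k : Nat) : ∀ (a b c : Int),
    (PySem.List.pyRange a (a + (k : Int)) 1).foldl
      (fun (st : Int × Int) i => if st.2 < h i then (i, h i) else st) (b, c)
    = ((PySem.List.pyRange a (a + (k : Int)) 1).foldl
        (fun (st : Int × Int × Int) i =>
          if st.2.1 < st.2.2 + (h i - h (i - 1))
          then (i, st.2.2 + (h i - h (i - 1)), st.2.2 + (h i - h (i - 1)))
          else (st.1, st.2.1, st.2.2 + (h i - h (i - 1)))) (b, c, h (a - 1)) |>.1,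
       (PySem.List.pyRange a (a + (k : Int)) 1).foldl
        (fun (st : Int × Int × Int) i =>
          if st.2.1 < st.2.2 + (h i - h (i - 1))
          then (i, st.2.2 + (h i - h (i - 1)), st.2.2 + (h i - h (i - 1)))
          else (st.1, st.2.1, st.2.2 + (h i - h (i - 1)))) (b, c, h (a - 1)) |>.2.1) := by
  induction k with
  | zero =>
    intro a b c
    rw [show a + ((0:Nat):Int) = a from by simp, PySem.List.pyRange_one_eq_nil (by omega)]
    simp
  | succ k ih =>
    intro a b c
    rw [show a + ((k+1 : Nat) : Int) = (a + 1) + (k : Int) from by push_cast; ring,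
      PySem.List.pyRange_one_cons (by omega)]
    simp only [List.foldl_cons]
    have hw : h (a - 1) + (h a - h (a - 1)) = h a := by ring
    have ha1 : (a + 1) - 1 = a := by ring
    by_cases hc : c < h a
    · rw [if_pos hc]
      simp only [hw, if_pos hc]
      have := ih (a + 1) a (h a)
      rw [ha1] at this
      exact this
    · rw [if_neg hc]
      simp only [hw, if_neg hc]
      have := ih (a + 1) b c
      rw [ha1] at this
      exact this

theorem pv_fold_cnt' (bits : List Int) (v : Int) (a b : Int) (h0 : 0 ≤ a) (hab : a ≤ b)
    (hb : b ≤ (bits.length : Int)) (s : Int) :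
    (PySem.List.pyRange a b 1).foldl
      (fun acc i => if PySem.List.pyGetD bits i 0 == v then acc + 1 else acc) s
    = s + (pvCnt bits v b.toNat - pvCnt bits v a.toNat) := by
  obtain ⟨aN, rfl⟩ : ∃ aN : Nat, a = (aN:Int) := ⟨a.toNat, by omega⟩
  obtain ⟨k, rfl⟩ : ∃ k : Nat, b = (aN:Int) + (k:Int) := ⟨(b-(aN:Int)).toNat, by omega⟩
  rw [pv_fold_cnt bits v aN k (by omega) s]
  simp only [Int.toNat_natCast, show (((aN:Int)+(k:Int))).toNat = aN + k from by omega]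

theorem win_count (bits : List Int) (v b n : Int) (hb : 0 ≤ b) (hn : 0 ≤ n) :
    (((PySem.List.slice bits (some b) (some (b + n))).countP (fun x => x == v) : Nat) : Int)
    = pvCnt bits v (b + n).toNat - pvCnt bits v b.toNat := by
  rw [PySem.List.slice_toNat bits hb (by omega)]
  rw [show pvCnt bits v (b+n).toNat = pvCnt bits v (b.toNat + ((b+n).toNat - b.toNat)) from by
    congr 1; omega]
  rw [pvCnt_add]
  ring

theorem pv_fold_fix (h : Int → Int) (hh : ∀ i, h i = 0) : ∀ l : List Int,
    l.foldl (fun (st : Int × Int) i => if st.2 < h i then (i, h i) else st)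
      ((0:Int), (0:Int)) = (0, 0) := by
  intro l
  induction l with
  | nil => rfl
  | cons x xs ih => simpa [hh] using ih

theorem secA_main (bits : List Int) (n : Int) (b : Int) (hb0 : 0 ≤ b) (hn : 0 < n)
    (hle : b + n ≤ (bits.length : Int)) :
    (PySem.List.pyRange 0 (bits.length : Int) 1).foldl
      (fun tochange i =>
        if (b > i ∨ b + n ≤ i) ∧ PySem.List.pyGetD bits i 0 == 1
        then (if (b ≤ i ∧ i < b + n) ∧ PySem.List.pyGetD bits i 0 == 0
              then tochange + 1 else tochange) + 1
        else (if (b ≤ i ∧ i < b + n) ∧ PySem.List.pyGetD bits i 0 == 0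
              then tochange + 1 else tochange)) 0
    = pvCnt bits 1 b.toNat + (pvCnt bits 0 (b + n).toNat - pvCnt bits 0 b.toNat)
      + (pvCnt bits 1 bits.length - pvCnt bits 1 (b + n).toNat) := by
  rw [PySem.List.pyRange_one_append 0 b (bits.length : Int) hb0 (by omega),
    PySem.List.pyRange_one_append b (b + n) (bits.length : Int) (by omega) hle,
    List.foldl_append, List.foldl_append]
  have e1 : ∀ s : Int, (PySem.List.pyRange 0 b 1).foldl
      (fun tochange i =>
        if (b > i ∨ b + n ≤ i) ∧ PySem.List.pyGetD bits i 0 == 1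
        then (if (b ≤ i ∧ i < b + n) ∧ PySem.List.pyGetD bits i 0 == 0
              then tochange + 1 else tochange) + 1
        else (if (b ≤ i ∧ i < b + n) ∧ PySem.List.pyGetD bits i 0 == 0
              then tochange + 1 else tochange)) s
      = (PySem.List.pyRange 0 b 1).foldl
        (fun acc i => if PySem.List.pyGetD bits i 0 == 1 then acc + 1 else acc) s := by
    intro s
    refine PySem.List.foldl_congr_mem _ _ _ _ ?_
    intro acc x hx
    obtain ⟨hx1, hx2⟩ := PySem.List.mem_pyRange_one.mp hx
    have hc1 : ¬((b ≤ x ∧ x < b + n) ∧ PySem.List.pyGetD bits x 0 == 0) := by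
      rintro ⟨⟨h1, _⟩, _⟩; omega
    simp only [if_neg hc1]
    by_cases hg : PySem.List.pyGetD bits x 0 == 1
    · rw [if_pos ⟨Or.inl (by omega), hg⟩, if_pos hg]
    · rw [if_neg (fun h => hg h.2), if_neg hg]
  have e2 : ∀ s : Int, (PySem.List.pyRange b (b + n) 1).foldl
      (fun tochange i =>
        if (b > i ∨ b + n ≤ i) ∧ PySem.List.pyGetD bits i 0 == 1
        then (if (b ≤ i ∧ i < b + n) ∧ PySem.List.pyGetD bits i 0 == 0
              then tochange + 1 else tochange) + 1
        else (if (b ≤ i ∧ i < b + n) ∧ PySem.List.pyGetD bits i 0 == 0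
              then tochange + 1 else tochange)) s
      = (PySem.List.pyRange b (b + n) 1).foldl
        (fun acc i => if PySem.List.pyGetD bits i 0 == 0 then acc + 1 else acc) s := by
    intro s
    refine PySem.List.foldl_congr_mem _ _ _ _ ?_
    intro acc x hx
    obtain ⟨hx1, hx2⟩ := PySem.List.mem_pyRange_one.mp hx
    have hc2 : ¬((b > x ∨ b + n ≤ x) ∧ PySem.List.pyGetD bits x 0 == 1) := by
      rintro ⟨h1, _⟩; omega
    rw [if_neg hc2]
    by_cases hg : PySem.List.pyGetD bits x 0 == 0
    · rw [if_pos ⟨⟨by omega, by omega⟩, hg⟩, if_pos hg]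
    · rw [if_neg (fun h => hg h.2), if_neg hg]
  have e3 : ∀ s : Int, (PySem.List.pyRange (b + n) (bits.length : Int) 1).foldl
      (fun tochange i =>
        if (b > i ∨ b + n ≤ i) ∧ PySem.List.pyGetD bits i 0 == 1
        then (if (b ≤ i ∧ i < b + n) ∧ PySem.List.pyGetD bits i 0 == 0
              then tochange + 1 else tochange) + 1
        else (if (b ≤ i ∧ i < b + n) ∧ PySem.List.pyGetD bits i 0 == 0
              then tochange + 1 else tochange)) s
      = (PySem.List.pyRange (b + n) (bits.length : Int) 1).foldl
        (fun acc i => if PySem.List.pyGetD bits i 0 == 1 then acc + 1 else acc) s := by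
    intro s
    refine PySem.List.foldl_congr_mem _ _ _ _ ?_
    intro acc x hx
    obtain ⟨hx1, hx2⟩ := PySem.List.mem_pyRange_one.mp hx
    have hc1 : ¬((b ≤ x ∧ x < b + n) ∧ PySem.List.pyGetD bits x 0 == 0) := by
      rintro ⟨⟨_, h2⟩, _⟩; omega
    simp only [if_neg hc1]
    by_cases hg : PySem.List.pyGetD bits x 0 == 1
    · rw [if_pos ⟨Or.inr (by omega), hg⟩, if_pos hg]
    · rw [if_neg (fun h => hg h.2), if_neg hg]
  rw [e3, e2, e1]
  rw [pv_fold_cnt' bits 1 0 b (by omega) hb0 (by omega),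
    pv_fold_cnt' bits 0 b (b + n) hb0 (by omega) hle,
    pv_fold_cnt' bits 1 (b + n) (bits.length : Int) (by omega) hle (by omega)]
  simp only [Int.toNat_zero, Int.toNat_natCast, pvCnt, List.take_zero, List.countP_nil, Nat.cast_zero]
  ring

theorem secA_low (bits : List Int) (n : Int) (hn : n ≤ 0) (b : Int) :
    (PySem.List.pyRange 0 (bits.length : Int) 1).foldl
      (fun tochange i =>
        if (b > i ∨ b + n ≤ i) ∧ PySem.List.pyGetD bits i 0 == 1
        then (if (b ≤ i ∧ i < b + n) ∧ PySem.List.pyGetD bits i 0 == 0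
              then tochange + 1 else tochange) + 1
        else (if (b ≤ i ∧ i < b + n) ∧ PySem.List.pyGetD bits i 0 == 0
              then tochange + 1 else tochange)) 0
    = ((bits.countP (fun x => x == 1) : Nat) : Int) := by
  have e : ∀ s : Int, (PySem.List.pyRange 0 (bits.length : Int) 1).foldl
      (fun tochange i =>
        if (b > i ∨ b + n ≤ i) ∧ PySem.List.pyGetD bits i 0 == 1
        then (if (b ≤ i ∧ i < b + n) ∧ PySem.List.pyGetD bits i 0 == 0
              then tochange + 1 else tochange) + 1
        else (if (b ≤ i ∧ i < b + n) ∧ PySem.List.pyGetD bits i 0 == 0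
              then tochange + 1 else tochange)) s
      = (PySem.List.pyRange 0 (bits.length : Int) 1).foldl
        (fun acc i => if PySem.List.pyGetD bits i 0 == 1 then acc + 1 else acc) s := by
    intro s
    refine PySem.List.foldl_congr_mem _ _ _ _ ?_
    intro acc x hx
    obtain ⟨hx1, hx2⟩ := PySem.List.mem_pyRange_one.mp hx
    have hc1 : ¬((b ≤ x ∧ x < b + n) ∧ PySem.List.pyGetD bits x 0 == 0) := by
      rintro ⟨⟨h1, h2⟩, _⟩; omega
    simp only [if_neg hc1]
    by_cases hg : PySem.List.pyGetD bits x 0 == 1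
    · rw [if_pos ⟨by omega, hg⟩, if_pos hg]
    · rw [if_neg (fun h => hg h.2), if_neg hg]
  rw [e, pv_fold_cnt' bits 1 0 (bits.length : Int) (by omega) (by positivity) (by omega)]
  rw [pvCnt_len bits 1 _ (by omega)]
  simp [pvCnt]

theorem secA_high (bits : List Int) (n : Int) (b : Int) (hb : b ≤ 0)
    (hbn : (bits.length : Int) ≤ b + n) :
    (PySem.List.pyRange 0 (bits.length : Int) 1).foldl
      (fun tochange i =>
        if (b > i ∨ b + n ≤ i) ∧ PySem.List.pyGetD bits i 0 == 1
        then (if (b ≤ i ∧ i < b + n) ∧ PySem.List.pyGetD bits i 0 == 0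
              then tochange + 1 else tochange) + 1
        else (if (b ≤ i ∧ i < b + n) ∧ PySem.List.pyGetD bits i 0 == 0
              then tochange + 1 else tochange)) 0
    = ((bits.countP (fun x => x == 0) : Nat) : Int) := by
  have e : ∀ s : Int, (PySem.List.pyRange 0 (bits.length : Int) 1).foldl
      (fun tochange i =>
        if (b > i ∨ b + n ≤ i) ∧ PySem.List.pyGetD bits i 0 == 1
        then (if (b ≤ i ∧ i < b + n) ∧ PySem.List.pyGetD bits i 0 == 0
              then tochange + 1 else tochange) + 1
        else (if (b ≤ i ∧ i < b + n) ∧ PySem.List.pyGetD bits i 0 == 0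
              then tochange + 1 else tochange)) s
      = (PySem.List.pyRange 0 (bits.length : Int) 1).foldl
        (fun acc i => if PySem.List.pyGetD bits i 0 == 0 then acc + 1 else acc) s := by
    intro s
    refine PySem.List.foldl_congr_mem _ _ _ _ ?_
    intro acc x hx
    obtain ⟨hx1, hx2⟩ := PySem.List.mem_pyRange_one.mp hx
    have hc2 : ¬((b > x ∨ b + n ≤ x) ∧ PySem.List.pyGetD bits x 0 == 1) := by
      rintro ⟨h1, _⟩; omega
    rw [if_neg hc2]
    by_cases hg : PySem.List.pyGetD bits x 0 == 0
    · rw [if_pos ⟨⟨by omega, by omega⟩, hg⟩, if_pos hg]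
    · rw [if_neg (fun h => hg h.2), if_neg hg]
  rw [e, pv_fold_cnt' bits 0 0 (bits.length : Int) (by omega) (by positivity) (by omega)]
  rw [pvCnt_len bits 0 _ (by omega)]
  simp [pvCnt]

theorem w0_eq (bits : List Int) (n : Int) (hn : 0 < n) :
    (((PySem.List.slice bits none (some n)).countP (fun x => x == 1) : Nat) : Int)
    = pvG bits n 0 := by
  rw [PySem.List.slice_to bits (le_of_lt hn)]
  unfold pvG
  simp [pvCnt]

theorem alt_fold_eq (bits : List Int) (n : Int) (hn : 0 < n) (b0 c0 w0 : Int) :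
    (PySem.List.pyRange 1 ((bits.length : Int) - n + 1) 1).foldl
      (fun (st : Int × Int × Int) i =>
        if st.2.1 < st.2.2 + (if PySem.List.pyGetD bits (i + n - 1) 0 == 1 then (1:Int) else 0)
                           - (if PySem.List.pyGetD bits (i - 1) 0 == 1 then (1:Int) else 0)
        then (i, st.2.2 + (if PySem.List.pyGetD bits (i + n - 1) 0 == 1 then (1:Int) else 0)
                        - (if PySem.List.pyGetD bits (i - 1) 0 == 1 then (1:Int) else 0),
                 st.2.2 + (if PySem.List.pyGetD bits (i + n - 1) 0 == 1 then (1:Int) else 0)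
                        - (if PySem.List.pyGetD bits (i - 1) 0 == 1 then (1:Int) else 0))
        else (st.1, st.2.1,
                 st.2.2 + (if PySem.List.pyGetD bits (i + n - 1) 0 == 1 then (1:Int) else 0)
                        - (if PySem.List.pyGetD bits (i - 1) 0 == 1 then (1:Int) else 0)))
      (b0, c0, w0)
    = (PySem.List.pyRange 1 ((bits.length : Int) - n + 1) 1).foldl
      (fun (st : Int × Int × Int) i =>
        if st.2.1 < st.2.2 + (pvG bits n i - pvG bits n (i - 1))
        then (i, st.2.2 + (pvG bits n i - pvG bits n (i - 1)),
                 st.2.2 + (pvG bits n i - pvG bits n (i - 1)))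
        else (st.1, st.2.1, st.2.2 + (pvG bits n i - pvG bits n (i - 1))))
      (b0, c0, w0) := by
  refine PySem.List.foldl_congr_mem _ _ _ _ ?_
  intro acc x hx
  obtain ⟨hx1, hx2⟩ := PySem.List.mem_pyRange_one.mp hx
  have hd := pvG_delta bits n hn x hx1 (by omega)
  have hww : acc.2.2 + (if PySem.List.pyGetD bits (x + n - 1) 0 == 1 then (1:Int) else 0)
      - (if PySem.List.pyGetD bits (x - 1) 0 == 1 then (1:Int) else 0)
      = acc.2.2 + (pvG bits n x - pvG bits n (x - 1)) := by
    rw [hd]; ring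
  rw [hww]

theorem first_loop_main (bits : List Int) (n : Int) (hn : 0 < n) (hL : n ≤ (bits.length : Int)) :
    (PySem.List.pyRange 0 ((bits.length : Int) - n + 1) 1).foldl
      (fun (st : Int × Int) i =>
        if st.2 < pvCount1A bits n i then (i, pvCount1A bits n i) else st) (0, 0)
    = ((PySem.List.pyRange 1 ((bits.length : Int) - n + 1) 1).foldl
        (fun (st : Int × Int × Int) i =>
          if st.2.1 < st.2.2 + (pvG bits n i - pvG bits n (i - 1))
          then (i, st.2.2 + (pvG bits n i - pvG bits n (i - 1)),
                   st.2.2 + (pvG bits n i - pvG bits n (i - 1)))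
          else (st.1, st.2.1, st.2.2 + (pvG bits n i - pvG bits n (i - 1))))
        (0, pvG bits n 0, pvG bits n 0) |>.1,
       (PySem.List.pyRange 1 ((bits.length : Int) - n + 1) 1).foldl
        (fun (st : Int × Int × Int) i =>
          if st.2.1 < st.2.2 + (pvG bits n i - pvG bits n (i - 1))
          then (i, st.2.2 + (pvG bits n i - pvG bits n (i - 1)),
                   st.2.2 + (pvG bits n i - pvG bits n (i - 1)))
          else (st.1, st.2.1, st.2.2 + (pvG bits n i - pvG bits n (i - 1))))
        (0, pvG bits n 0, pvG bits n 0) |>.2.1) := by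
  have e : (PySem.List.pyRange 0 ((bits.length : Int) - n + 1) 1).foldl
      (fun (st : Int × Int) i =>
        if st.2 < pvCount1A bits n i then (i, pvCount1A bits n i) else st) (0, 0)
      = (PySem.List.pyRange 0 ((bits.length : Int) - n + 1) 1).foldl
        (fun (st : Int × Int) i => if st.2 < pvG bits n i then (i, pvG bits n i) else st) (0, 0) := by
    refine PySem.List.foldl_congr_mem _ _ _ _ ?_
    intro acc x hx
    obtain ⟨hx1, hx2⟩ := PySem.List.mem_pyRange_one.mp hx
    rw [pvCount1A_eq bits n hn x hx1 (by omega)]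
  rw [e, PySem.List.pyRange_one_cons (by omega), List.foldl_cons]
  have e2 : (if (0:Int) < pvG bits n 0 then ((0:Int), pvG bits n 0) else ((0:Int), (0:Int)))
      = (0, pvG bits n 0) := by
    rcases (pvG_nonneg bits n 0).lt_or_eq with h | h
    · rw [if_pos h]
    · rw [if_neg (by omega), ← h]
  rw [e2]
  have hk : (bits.length : Int) - n + 1 = 1 + (((bits.length : Int) - n).toNat : Int) := by omega
  rw [hk]
  have := pv_sim (pvG bits n) ((bits.length : Int) - n).toNat 1 0 (pvG bits n 0)
  rw [show (1:Int) - 1 = 0 from by norm_num] at this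
  exact this

theorem pv_best_mem3 (h : Int → Int) (l : List Int) : ∀ (b c w : Int),
    (l.foldl (fun (st : Int × Int × Int) i =>
        if st.2.1 < st.2.2 + (h i - h (i - 1))
        then (i, st.2.2 + (h i - h (i - 1)), st.2.2 + (h i - h (i - 1)))
        else (st.1, st.2.1, st.2.2 + (h i - h (i - 1)))) (b, c, w)).1 = b ∨
    (l.foldl (fun (st : Int × Int × Int) i =>
        if st.2.1 < st.2.2 + (h i - h (i - 1))
        then (i, st.2.2 + (h i - h (i - 1)), st.2.2 + (h i - h (i - 1)))
        else (st.1, st.2.1, st.2.2 + (h i - h (i - 1)))) (b, c, w)).1 ∈ l := by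
  induction l with
  | nil => intro b c w; left; rfl
  | cons x xs ih =>
    intro b c w
    simp only [List.foldl_cons]
    by_cases hx : c < w + (h x - h (x - 1))
    · rw [if_pos hx]
      rcases ih x (w + (h x - h (x - 1))) (w + (h x - h (x - 1))) with h1 | h1
      · right; rw [h1]; exact List.mem_cons_self
      · right; exact List.mem_cons_of_mem _ h1
    · rw [if_neg hx]
      rcases ih b c (w + (h x - h (x - 1))) with h1 | h1
      · left; exact h1
      · right; exact List.mem_cons_of_mem _ h1

theorem opt_eq (bits : List Int) (n : Int) : opt_dist2 bits n = opt_dist2_alt bits n := by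
  by_cases hn0 : n ≤ 0
  · simp only [opt_dist2, opt_dist2_alt]
    rw [if_neg (by omega : ¬((0:Int) < n ∧ n ≤ (bits.length : Int))),
      pv_fold_fix (pvCount1A bits n) (pvCount1A_nonpos bits n hn0),
      secA_low bits n hn0, show max n 0 = 0 from by omega,
      win_count bits 0 0 0 (by omega) (by omega), win_count bits 1 0 0 (by omega) (by omega)]
    ring_nf
  · by_cases hnL : n ≤ (bits.length : Int)
    · have hn : 0 < n := by omega
      simp only [opt_dist2, opt_dist2_alt]
      rw [if_pos ⟨hn, hnL⟩, w0_eq bits n hn,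
        alt_fold_eq bits n hn 0 (pvG bits n 0) (pvG bits n 0),
        first_loop_main bits n hn hnL]
      set F := (PySem.List.pyRange 1 ((bits.length : Int) - n + 1) 1).foldl
        (fun (st : Int × Int × Int) i =>
          if st.2.1 < st.2.2 + (pvG bits n i - pvG bits n (i - 1))
          then (i, st.2.2 + (pvG bits n i - pvG bits n (i - 1)),
                   st.2.2 + (pvG bits n i - pvG bits n (i - 1)))
          else (st.1, st.2.1, st.2.2 + (pvG bits n i - pvG bits n (i - 1))))
        (0, pvG bits n 0, pvG bits n 0) with hF
      have hmem := pv_best_mem3 (pvG bits n)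
        (PySem.List.pyRange 1 ((bits.length : Int) - n + 1) 1) 0 (pvG bits n 0) (pvG bits n 0)
      rw [← hF] at hmem
      have hb0 : 0 ≤ F.1 := by
        rcases hmem with h1 | h1
        · omega
        · have := PySem.List.mem_pyRange_one.mp h1; omega
      have hbn : F.1 + n ≤ (bits.length : Int) := by
        rcases hmem with h1 | h1
        · omega
        · have := PySem.List.mem_pyRange_one.mp h1; omega
      rw [secA_main bits n F.1 hb0 hn hbn]
      rw [show max n 0 = n from by omega]
      rw [win_count bits 0 F.1 n hb0 hn.le, win_count bits 1 F.1 n hb0 hn.le]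
      rw [← pvCnt_len bits 1 bits.length (le_refl _)]
      ring
    · have hn : 0 < n := by omega
      simp only [opt_dist2, opt_dist2_alt]
      rw [if_neg (by omega : ¬((0:Int) < n ∧ n ≤ (bits.length : Int)))]
      rw [PySem.List.pyRange_one_eq_nil (by omega : (bits.length : Int) - n + 1 ≤ 0)]
      simp only [List.foldl_nil]
      refine (secA_high bits n 0 (by omega) (by omega)).trans ?_
      rw [show max n 0 = n from by omega]
      rw [win_count bits 0 0 n (by omega) hn.le, win_count bits 1 0 n (by omega) hn.le]
      rw [show ((0:Int) + n).toNat = n.toNat from by omega]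
      rw [pvCnt_len bits 0 n.toNat (by omega), pvCnt_len bits 1 n.toNat (by omega)]
      simp [pvCnt]

-- ===== VERDICT (by name: the statement is the Claim_ definition above) =====
theorem opt_dist2_spec : Claim_equal_opt_dist2 := by
  intro bits n _
  show opt_dist2 bits n = opt_dist2_alt bits n
  exact opt_eq bits n
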